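-- pv_equiv track=rewrite | github.com/Wout-Vanherf/ManoMapV2 | Python/detection.py | match_single_seq
-- ===== SOURCE A (Python) =====
-- def match_single_seq(seq1, seq2, amount_overlapped):
--     tmp1 = []
--     for val in seq1:
--         tmp1.append(val[0])
--     tmp2 = []
--     for val in seq2:
--         tmp2.append(val[0])
--     return len(set(tmp1) & set(tmp2)) >= amount_overlapped
-- ===== SOURCE B (Python) =====
-- def match_single_seq(seq1, seq2, amount_overlapped):
--     a = sorted({v[0] for v in seq1})
--     b = sorted({v[0] for v in seq2})
--     i = j = 0
--     count = 0
--     while i < len(a) and j < len(b):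
--         if a[i] < b[j]:
--             i += 1
--         elif b[j] < a[i]:
--             j += 1
--         else:
--             count += 1
--             i += 1
--             j += 1
--     return count >= amount_overlapped
-- ===== Notes on version B (the rewrite author's own statement) =====
-- stated objective: alternative
-- what changed: Replaces the append loops plus hash-set intersection by a sort-then-merge algorithm: sort each side's distinct first elements and count common keys with a two-pointer merge scan.
import Mathlib
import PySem

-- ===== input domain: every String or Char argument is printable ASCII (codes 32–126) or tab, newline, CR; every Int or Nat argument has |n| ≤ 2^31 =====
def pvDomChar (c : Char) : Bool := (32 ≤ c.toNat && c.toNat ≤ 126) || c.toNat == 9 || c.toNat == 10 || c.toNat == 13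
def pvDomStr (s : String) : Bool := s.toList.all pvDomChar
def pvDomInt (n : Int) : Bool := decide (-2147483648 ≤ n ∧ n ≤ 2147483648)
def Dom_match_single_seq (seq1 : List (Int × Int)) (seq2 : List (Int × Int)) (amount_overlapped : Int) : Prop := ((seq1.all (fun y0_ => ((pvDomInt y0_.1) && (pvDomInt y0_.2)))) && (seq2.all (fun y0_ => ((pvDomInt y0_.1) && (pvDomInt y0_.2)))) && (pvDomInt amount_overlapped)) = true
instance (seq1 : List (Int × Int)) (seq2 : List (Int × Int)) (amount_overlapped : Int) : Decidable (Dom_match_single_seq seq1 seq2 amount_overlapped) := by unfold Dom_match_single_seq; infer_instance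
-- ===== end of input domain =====

-- B replaces the append loops plus hash-set intersection by sort-then-merge: sort each side's
-- distinct first elements and count common keys with a two-pointer merge scan (alternative algorithm).

-- ===== PORT A =====
def match_single_seq (seq1 : List (Int × Int)) (seq2 : List (Int × Int)) (amount_overlapped : Int) : Bool :=
  let tmp1 := seq1.foldl (fun acc v => acc ++ [v.1]) []
  let tmp2 := seq2.foldl (fun acc v => acc ++ [v.1]) []
  decide (((PySem.Set.inter (PySem.Set.ofList tmp1) (PySem.Set.ofList tmp2)).length : Int) ≥ amount_overlapped)

-- ===== PORT B =====
-- the while-loop over indices i, j with accumulator count, as recursion on the two sorted lists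
def msMerge : List Int → List Int → Int → Int
  | x :: a, y :: b, c =>
    if x < y then msMerge a (y :: b) c
    else if y < x then msMerge (x :: a) b c
    else msMerge a b (c + 1)
  | _, _, c => c
termination_by a b _ => a.length + b.length

def match_single_seq_alt (seq1 : List (Int × Int)) (seq2 : List (Int × Int)) (amount_overlapped : Int) : Bool :=
  let a := PySem.List.sorted (PySem.Set.ofList (seq1.map (·.1))) (fun x => x) false
  let b := PySem.List.sorted (PySem.Set.ofList (seq2.map (·.1))) (fun x => x) false
  decide (msMerge a b 0 ≥ amount_overlapped)

-- ===== PRECONDITION & SPEC =====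
def Spec_match_single_seq (seq1 : List (Int × Int)) (seq2 : List (Int × Int)) (amount_overlapped : Int) (out : Bool) : Prop := out = match_single_seq_alt seq1 seq2 amount_overlapped
instance (seq1 : List (Int × Int)) (seq2 : List (Int × Int)) (amount_overlapped : Int) (out : Bool) : Decidable (Spec_match_single_seq seq1 seq2 amount_overlapped out) := by unfold Spec_match_single_seq; infer_instance

-- ===== CLAIM (what is proved, stated in full; the proofs are below) =====
def Claim_equal_match_single_seq : Prop := ∀ (seq1 : List (Int × Int)) (seq2 : List (Int × Int)) (amount_overlapped : Int), Dom_match_single_seq seq1 seq2 amount_overlapped → Spec_match_single_seq seq1 seq2 amount_overlapped (match_single_seq seq1 seq2 amount_overlapped)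

-- ===== LEMMAS AND PROOFS =====

theorem foldl_append_singleton (f : (Int × Int) → Int) (l : List (Int × Int)) (acc : List Int) :
    l.foldl (fun acc v => acc ++ [f v]) acc = acc ++ l.map f := by
  induction l generalizing acc with
  | nil => simp
  | cons v rest ih => simp [List.foldl, ih]

theorem nodup_length_eq_card (l : List Int) (hn : l.Nodup) :
    l.length = l.toFinset.card := (List.toFinset_card_of_nodup hn).symm

theorem inter_card (t1 t2 : List Int) :
    ((PySem.Set.inter (PySem.Set.ofList t1) (PySem.Set.ofList t2)).length : Int)
      = ((t1.toFinset ∩ t2.toFinset).card : Int) := by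
  have hn : (PySem.Set.inter (PySem.Set.ofList t1) (PySem.Set.ofList t2)).Nodup :=
    PySem.Set.nodup_inter _ _ (PySem.Set.nodup_ofList t1)
  rw [nodup_length_eq_card _ hn]
  congr 2
  ext x
  simp [PySem.Set.mem_inter, PySem.Set.mem_ofList]

-- the merge loop on strictly increasing lists counts the elements of a that also lie in b
theorem msMerge_eq (a : List Int) (ha : a.Pairwise (· < ·)) :
    ∀ (b : List Int), b.Pairwise (· < ·) → ∀ (c : Int),
      msMerge a b c = c + ((a.filter (fun x => decide (x ∈ b))).length : Int) := by
  induction a with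
  | nil => intro b _ c; cases b <;> simp [msMerge]
  | cons x a' iha =>
    intro b
    induction b with
    | nil =>
      intro _ c
      simp [msMerge, List.filter]
    | cons y b' ihb =>
      intro hb c
      rw [msMerge]
      by_cases h1 : x < y
      · rw [if_pos h1]
        have hx : x ∉ y :: b' := by
          intro hm
          rcases List.mem_cons.mp hm with h | h
          · omega
          · have := (List.pairwise_cons.mp hb).1 x h; omega
        have hf : List.filter (fun z => decide (z ∈ y :: b')) (x :: a')
            = List.filter (fun z => decide (z ∈ y :: b')) a' := by
          simp [List.filter, hx]
        rw [hf]
        exact iha (List.Pairwise.sublist (List.sublist_cons_self x a') ha) (y :: b') hb c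
      · rw [if_neg h1]
        by_cases h2 : y < x
        · rw [if_pos h2]
          have hf : List.filter (fun z => decide (z ∈ y :: b')) (x :: a')
              = List.filter (fun z => decide (z ∈ b')) (x :: a') := by
            apply List.filter_congr
            intro z hz
            have hzx : x ≤ z := by
              rcases List.mem_cons.mp hz with h | h
              · omega
              · have := (List.pairwise_cons.mp ha).1 z h; omega
            have hzy : z ≠ y := by omega
            simp [List.mem_cons, hzy]
          rw [hf]
          exact ihb (List.Pairwise.sublist (List.sublist_cons_self y b') hb) c
        · -- x = y
          have hxy : x = y := by omega
          rw [if_neg h2]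
          have hrec := iha (List.Pairwise.sublist (List.sublist_cons_self x a') ha) b'
            (List.Pairwise.sublist (List.sublist_cons_self y b') hb) (c + 1)
          rw [hrec]
          have hxin : x ∈ y :: b' := by simp [hxy]
          have hf : List.filter (fun z => decide (z ∈ y :: b')) (x :: a')
              = x :: List.filter (fun z => decide (z ∈ b')) a' := by
            simp only [List.filter, hxin, decide_true]
            congr 1
            apply List.filter_congr
            intro z hz
            have hzx : x < z := (List.pairwise_cons.mp ha).1 z hz
            have hzy : z ≠ y := by omega
            simp [List.mem_cons, hzy]
          rw [hf]
          simp only [List.length_cons]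
          push_cast
          ring

theorem filter_mem_card (a b t1 t2 : List Int) (ha : a.Nodup)
    (hma : ∀ x, x ∈ a ↔ x ∈ t1) (hmb : ∀ x, x ∈ b ↔ x ∈ t2) :
    ((a.filter (fun x => decide (x ∈ b))).length : Int) = ((t1.toFinset ∩ t2.toFinset).card : Int) := by
  have hnf : (a.filter (fun x => decide (x ∈ b))).Nodup := ha.filter _
  rw [nodup_length_eq_card _ hnf]
  congr 2
  ext x
  simp only [List.mem_toFinset, List.mem_filter, Finset.mem_inter, decide_eq_true_eq]
  rw [hma x, hmb x]

-- ===== VERDICT (by name: the statement is the Claim_ definition above) =====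
theorem match_single_seq_spec : Claim_equal_match_single_seq := by
  intro seq1 seq2 amount _
  unfold Spec_match_single_seq match_single_seq match_single_seq_alt
  simp only [foldl_append_singleton, List.nil_append]
  rw [inter_card]
  have ha := PySem.List.sorted_ofList_pairwise_lt (xs := seq1.map (·.1))
  have hb := PySem.List.sorted_ofList_pairwise_lt (xs := seq2.map (·.1))
  rw [msMerge_eq _ ha _ hb 0, zero_add]
  rw [filter_mem_card _ _ (seq1.map (·.1)) (seq2.map (·.1)) ha.nodup
    (fun x => by rw [PySem.List.mem_sorted, PySem.Set.mem_ofList])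
    (fun x => by rw [PySem.List.mem_sorted, PySem.Set.mem_ofList])]
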